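-- pv_equiv track=rewrite | github.com/shadwhand/gexbot | scripts/compute.py | structure_volatility
-- ===== SOURCE A (Python) =====
-- def structure_volatility(regime_history):
--     """Detect structure volatility from regime flip history.
--
--     regime_history = list of regime strings from consecutive reads.
--     Returns (flag, flip_count). HIGH if 2+ flips in sequence.
--     """
--     if not regime_history or len(regime_history) < 2:
--         return "LOW", 0
--     flips = 0
--     for i in range(1, len(regime_history)):
--         if regime_history[i] != regime_history[i - 1]:
--             flips += 1
--     if flips >= 2:
--         return "HIGH", flips
--     elif flips == 1:
--         return "MODERATE", flips
--     return "LOW", flips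
-- ===== SOURCE B (Python) =====
-- def _flips(seg):
--     """Number of adjacent unequal pairs in seg, by divide and conquer:
--     split at the midpoint, recurse on both halves, add the boundary pair."""
--     if len(seg) < 2:
--         return 0
--     mid = len(seg) // 2
--     return _flips(seg[:mid]) + _flips(seg[mid:]) + (1 if seg[mid - 1] != seg[mid] else 0)
--
--
-- def structure_volatility(regime_history):
--     if not regime_history or len(regime_history) < 2:
--         return "LOW", 0
--     flips = _flips(regime_history)
--     flag = ("LOW", "MODERATE", "HIGH")[min(flips, 2)]
--     return flag, flips
-- ===== Notes on version B (the rewrite author's own statement) =====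
-- stated objective: alternative
-- what changed: Replaces the single linear index loop with a divide-and-conquer recursion (split at the midpoint, recurse on both halves, add the boundary pair) and replaces the HIGH/MODERATE/LOW branch chain with a tuple lookup indexed by min(flips, 2).
import Mathlib
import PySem

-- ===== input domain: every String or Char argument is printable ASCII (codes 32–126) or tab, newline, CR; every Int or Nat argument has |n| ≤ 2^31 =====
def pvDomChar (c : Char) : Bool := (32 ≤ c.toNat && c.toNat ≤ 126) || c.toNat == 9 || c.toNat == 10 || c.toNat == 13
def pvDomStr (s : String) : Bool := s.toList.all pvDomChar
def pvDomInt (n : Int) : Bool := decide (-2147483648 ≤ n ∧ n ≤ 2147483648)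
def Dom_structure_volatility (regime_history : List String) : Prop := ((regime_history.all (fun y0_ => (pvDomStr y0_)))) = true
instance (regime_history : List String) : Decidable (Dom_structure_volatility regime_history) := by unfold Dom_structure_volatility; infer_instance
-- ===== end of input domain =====

-- B computes the flip count by divide-and-conquer (split at the midpoint, recurse, add the boundary pair) and classifies via a tuple lookup indexed by min(flips,2); objective: alternative.


-- ===== PORT A =====
-- literal port of A: for i in range(1, len): compare xs[i] with xs[i-1] (indices always in range)
def structure_volatility (regime_history : List String) : String × Int :=
  if regime_history = [] ∨ (regime_history.length : Int) < 2 then ("LOW", 0)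
  else
    let flips : Int :=
      (PySem.List.pyRange 1 (regime_history.length : Int) 1).foldl
        (fun acc i =>
          if PySem.List.pyGetD regime_history i "" ≠ PySem.List.pyGetD regime_history (i - 1) "" then
            acc + 1
          else acc) 0
    if flips ≥ 2 then ("HIGH", flips)
    else if flips = 1 then ("MODERATE", flips)
    else ("LOW", flips)

-- ===== PORT B =====
-- _flips: divide and conquer; seg[:mid], seg[mid:] are slices, seg[mid-1]/seg[mid] indexings (in range)
def pvFlipsB (seg : List String) : Int :=
  if seg.length < 2 then 0
  else
    let mid : Int := PySem.Int.floordiv (seg.length : Int) 2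
    pvFlipsB (PySem.List.slice seg none (some mid)) +
    pvFlipsB (PySem.List.slice seg (some mid) none) +
    (if PySem.List.pyGetD seg (mid - 1) "" ≠ PySem.List.pyGetD seg mid "" then 1 else 0)
termination_by seg.length
decreasing_by
  · have hm : PySem.Int.floordiv (seg.length : Int) 2 = ((seg.length / 2 : ℕ) : Int) :=
      by exact_mod_cast PySem.Int.floordiv_natCast seg.length 2
    rw [hm, PySem.List.slice_to_natCast]
    simp only [List.length_take]
    omega
  · have hm : PySem.Int.floordiv (seg.length : Int) 2 = ((seg.length / 2 : ℕ) : Int) :=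
      by exact_mod_cast PySem.Int.floordiv_natCast seg.length 2
    rw [hm, PySem.List.slice_from_natCast]
    simp only [List.length_drop]
    omega

def structure_volatility_alt (regime_history : List String) : String × Int :=
  if regime_history = [] ∨ (regime_history.length : Int) < 2 then ("LOW", 0)
  else
    let flips : Int := pvFlipsB regime_history
    let flag : String := PySem.List.pyGetD ["LOW", "MODERATE", "HIGH"] (min flips 2) ""
    (flag, flips)

-- ===== PRECONDITION & SPEC =====
def Spec_structure_volatility (regime_history : List String) (out : String × Int) : Prop := out = structure_volatility_alt regime_history
instance (regime_history : List String) (out : String × Int) : Decidable (Spec_structure_volatility regime_history out) := by unfold Spec_structure_volatility; infer_instance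

-- ===== CLAIM =====
def Claim_equal_structure_volatility : Prop := ∀ (regime_history : List String), Dom_structure_volatility regime_history → Spec_structure_volatility regime_history (structure_volatility regime_history)

-- ===== LEMMAS AND PROOFS =====

-- the common specification: number of adjacent unequal pairs
def countAdj : List String → Int
  | [] => 0
  | [_] => 0
  | a :: b :: t => (if a ≠ b then 1 else 0) + countAdj (b :: t)

lemma countAdj_nonneg : ∀ (xs : List String), 0 ≤ countAdj xs
  | [] => le_refl 0
  | [_] => le_refl 0
  | a :: b :: t => by
      have := countAdj_nonneg (b :: t)
      unfold countAdj
      split_ifs <;> omega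

lemma countAdj_take_drop : ∀ (seg : List String) (k : ℕ), 1 ≤ k → k < seg.length →
    countAdj seg = countAdj (seg.take k) + countAdj (seg.drop k) +
      (if seg.getD (k - 1) "" ≠ seg.getD k "" then 1 else 0) := by
  intro seg
  induction seg with
  | nil => intro k h1 h2; simp at h2
  | cons a t ih =>
    intro k h1 h2
    match k, h1 with
    | 1, _ =>
      match t, h2 with
      | b :: t', _ =>
        have hl : countAdj (a :: b :: t') = (if a ≠ b then 1 else 0) + countAdj (b :: t') := rfl
        rw [hl]
        simp only [List.take_succ_cons, List.take_zero, List.drop_succ_cons, List.drop_zero,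
          Nat.sub_self, List.getD_cons_succ, List.getD_cons_zero]
        have hca : countAdj [a] = 0 := rfl
        rw [hca]
        ring
    | (j+2), _ =>
      match t, (by simp at h2; omega : 1 ≤ t.length) with
      | b :: t', _ =>
        have hj : 1 ≤ j + 1 := by omega
        have hj2 : j + 1 < (b :: t').length := by simp at h2 ⊢; omega
        have := ih (j + 1) hj hj2
        have htake : (a :: b :: t').take (j + 2) = a :: (b :: t').take (j + 1) := rfl
        have hdrop : (a :: b :: t').drop (j + 2) = (b :: t').drop (j + 1) := rfl
        rw [htake, hdrop]
        have htk : (b :: t').take (j + 1) = b :: t'.take j := rfl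
        rw [htk]
        have hh : countAdj (a :: b :: t'.take j) = (if a ≠ b then 1 else 0) + countAdj (b :: t'.take j) := by
          cases t'.take j <;> rfl
        have hh2 : countAdj (a :: b :: t') = (if a ≠ b then 1 else 0) + countAdj (b :: t') := rfl
        rw [hh, hh2, ← htk, this]
        have hg1 : (a :: b :: t').getD (j + 2) "" = (b :: t').getD (j + 1) "" := rfl
        have hg2 : (a :: b :: t').getD (j + 2 - 1) "" = (b :: t').getD (j + 1 - 1) "" := rfl
        rw [hg2, hg1]
        ring

lemma pvFlipsB_eq_countAdj : ∀ (seg : List String), pvFlipsB seg = countAdj seg := by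
  intro seg
  induction seg using pvFlipsB.induct with
  | case1 seg h =>
    rw [pvFlipsB, if_pos h]
    match seg, h with
    | [], _ => rfl
    | [_], _ => rfl
  | case2 seg h mid ih1 ih2 =>
    rw [pvFlipsB, if_neg h]
    simp only []
    have hm : PySem.Int.floordiv (seg.length : Int) 2 = ((seg.length / 2 : ℕ) : Int) :=
      by exact_mod_cast PySem.Int.floordiv_natCast seg.length 2
    have hmdef : mid = ((seg.length / 2 : ℕ) : Int) := hm
    rw [hmdef] at ih1 ih2
    rw [hm]
    set m : ℕ := seg.length / 2 with hmn
    have hm1 : 1 ≤ m := by omega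
    have hm2 : m < seg.length := by omega
    rw [PySem.List.slice_to_natCast] at ih1
    rw [PySem.List.slice_from_natCast] at ih2
    rw [PySem.List.slice_to_natCast, PySem.List.slice_from_natCast, ih1, ih2]
    have hidx : ((m : Int) - 1) = ((m - 1 : ℕ) : Int) := by omega
    rw [hidx, PySem.List.pyGetD_natCast, PySem.List.pyGetD_natCast]
    rw [countAdj_take_drop seg m hm1 hm2]

lemma pvFoldA_eq_countAdj (t : List String) : ∀ (a : String) (acc : Int),
    (List.range t.length).foldl
      (fun acc k => if (a :: t).getD (k + 1) "" ≠ (a :: t).getD k "" then acc + 1 else acc) acc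
      = acc + countAdj (a :: t) := by
  induction t with
  | nil => intro a acc; simp [countAdj]
  | cons x t ih =>
    intro a acc
    rw [List.length_cons, List.range_succ_eq_map, List.foldl_cons, List.foldl_map]
    have hfun : (fun (acc : Int) (k : ℕ) =>
        if (a :: x :: t).getD (k + 1 + 1) "" ≠ (a :: x :: t).getD (k + 1) "" then acc + 1 else acc)
        = fun (acc : Int) (k : ℕ) =>
          if (x :: t).getD (k + 1) "" ≠ (x :: t).getD k "" then acc + 1 else acc := by
      funext acc k
      simp
    rw [hfun, ih x]
    simp only [List.getD_cons_succ, List.getD_cons_zero]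
    have hc : countAdj (a :: x :: t) = (if a ≠ x then 1 else 0) + countAdj (x :: t) := rfl
    rw [hc]
    by_cases h : a = x
    · subst h; simp
    · simp [h, Ne.symm h]
      ring

lemma pvFlipsA_eq (a : String) (t : List String) :
    (PySem.List.pyRange 1 ((a :: t).length : Int) 1).foldl
      (fun acc i =>
        if PySem.List.pyGetD (a :: t) i "" ≠ PySem.List.pyGetD (a :: t) (i - 1) "" then acc + 1
        else acc) 0
      = countAdj (a :: t) := by
  rw [PySem.List.pyRange_one, List.foldl_map]
  have hlen : (((a :: t).length : Int) - 1).toNat = t.length := by simp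
  rw [hlen]
  have hfun : (fun (acc : Int) (k : ℕ) =>
      if PySem.List.pyGetD (a :: t) (1 + (k : Int)) "" ≠ PySem.List.pyGetD (a :: t) (1 + (k : Int) - 1) "" then acc + 1
      else acc)
      = fun (acc : Int) (k : ℕ) => if (a :: t).getD (k + 1) "" ≠ (a :: t).getD k "" then acc + 1 else acc := by
    funext acc k
    have h2 : (1 : Int) + (k : Int) - 1 = ((k : ℕ) : Int) := by ring
    have h1 : (1 : Int) + (k : Int) = ((k + 1 : ℕ) : Int) := by push_cast; ring
    rw [h2, h1, PySem.List.pyGetD_natCast, PySem.List.pyGetD_natCast]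
  rw [hfun, pvFoldA_eq_countAdj]
  simp

-- ===== VERDICT =====
theorem structure_volatility_spec : Claim_equal_structure_volatility := by
  intro xs _
  unfold Spec_structure_volatility structure_volatility structure_volatility_alt
  cases xs with
  | nil => simp
  | cons a t =>
    by_cases h : (a :: t : List String) = [] ∨ ((a :: t).length : Int) < 2
    · rw [if_pos h, if_pos h]
    · rw [if_neg h, if_neg h]
      simp only []
      rw [pvFlipsA_eq, pvFlipsB_eq_countAdj]
      set n : Int := countAdj (a :: t) with hn
      have h0 : 0 ≤ n := countAdj_nonneg _
      by_cases h2 : n ≥ 2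
      · rw [if_pos h2]
        have : min n 2 = ((2 : ℕ) : Int) := by omega
        rw [this, PySem.List.pyGetD_natCast]
        rfl
      · rw [if_neg h2]
        by_cases h1 : n = 1
        · rw [if_pos h1]
          have : min n 2 = ((1 : ℕ) : Int) := by omega
          rw [this, PySem.List.pyGetD_natCast]
          rfl
        · rw [if_neg h1]
          have : min n 2 = ((0 : ℕ) : Int) := by omega
          rw [this, PySem.List.pyGetD_natCast]
          rfl
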